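-- pv_equiv track=rewrite | github.com/YashB63/GFG-Daily-Questions | Day 271/Unique Number of Occurrences/unique_number_of_occurences.py | isFrequencyUnique
-- ===== SOURCE A (Python) =====
-- from typing import List
--
-- def isFrequencyUnique(n : int, arr : List[int]) -> bool:
--     Map = {}
--     for i in arr:
--         if i in Map.keys():
--             Map[i] = Map[i] + 1
--         else:
--             Map[i] = 1
--     counts = []
--     for value in Map.values():
--         if value in counts:
--             return False
--         else:
--             counts.append(value)
--     return True
-- ===== SOURCE B (Python) =====
-- def isFrequencyUnique(n, arr):
--     s = sorted(arr)
--     freqs = []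
--     run = 1
--     for a, b in zip(s, s[1:]):
--         if a == b:
--             run += 1
--         else:
--             freqs.append(run)
--             run = 1
--     if s:
--         freqs.append(run)
--     freqs.sort()
--     return all(a != b for a, b in zip(freqs, freqs[1:]))
-- ===== Notes on version B (the rewrite author's own statement) =====
-- stated objective: alternative
-- what changed: B drops the dict entirely: it sorts the array, collects run lengths of equal neighbours in one scan, then sorts the run lengths and compares adjacent elements, instead of A's dict-building loop plus a growing-list membership scan with early return.
import Mathlib
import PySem

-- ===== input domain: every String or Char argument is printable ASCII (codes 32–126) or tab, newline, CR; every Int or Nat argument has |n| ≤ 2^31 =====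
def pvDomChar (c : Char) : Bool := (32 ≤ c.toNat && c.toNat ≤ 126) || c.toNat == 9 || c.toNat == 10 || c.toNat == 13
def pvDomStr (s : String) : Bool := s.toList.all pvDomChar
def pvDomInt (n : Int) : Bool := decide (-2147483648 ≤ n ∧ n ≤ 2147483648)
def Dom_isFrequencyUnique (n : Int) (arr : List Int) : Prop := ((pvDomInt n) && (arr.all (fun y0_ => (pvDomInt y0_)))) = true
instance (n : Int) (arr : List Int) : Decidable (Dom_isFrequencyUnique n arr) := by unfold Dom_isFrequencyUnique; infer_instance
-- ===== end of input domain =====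

-- B replaces A's dict + growing-list membership loop by sort-then-scan: sort the
-- array, collect run lengths, sort them and compare adjacent elements.


-- ===== PORT A =====
-- second loop of A: for value in Map.values(): if value in counts: return False else counts.append(value)
def loopA (vals : List Int) (counts : List Int) : Bool :=
  match vals with
  | [] => true
  | v :: rest => if counts.contains v then false else loopA rest (counts ++ [v])

-- Map[i] is guarded by 'i in Map.keys()', so getD i 0 returns the stored value there
def isFrequencyUnique (n : Int) (arr : List Int) : Bool :=
  let Map := arr.foldl
    (fun d i => if d.contains i then d.insert i (d.getD i 0 + 1) else d.insert i 1)
    PySem.Dict.empty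
  loopA Map.values []

-- ===== PORT B =====
-- s = sorted(arr); one scan over zip(s, s[1:]) collecting run lengths; trailing run
-- appended when s is nonempty; freqs.sort(); all(a != b for a, b in zip(freqs, freqs[1:]))
def isFrequencyUnique_alt (n : Int) (arr : List Int) : Bool :=
  let s := PySem.List.sorted arr (fun v => v) false
  let st := (s.zip (PySem.List.slice s (some 1) none)).foldl
    (fun (st : List Int × Int) p =>
      if p.1 == p.2 then (st.1, st.2 + 1) else (st.1 ++ [st.2], 1))
    ([], 1)
  let freqs := if s.isEmpty then st.1 else st.1 ++ [st.2]
  let freqs2 := PySem.List.sorted freqs (fun v => v) false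
  (freqs2.zip (PySem.List.slice freqs2 (some 1) none)).all (fun q => q.1 != q.2)

-- ===== PRECONDITION & SPEC =====
def Spec_isFrequencyUnique (n : Int) (arr : List Int) (out : Bool) : Prop := out = isFrequencyUnique_alt n arr
instance (n : Int) (arr : List Int) (out : Bool) : Decidable (Spec_isFrequencyUnique n arr out) := by unfold Spec_isFrequencyUnique; infer_instance

-- ===== CLAIM (what is proved, stated in full; the proofs are below) =====
def Claim_equal_isFrequencyUnique : Prop := ∀ (n : Int) (arr : List Int), Dom_isFrequencyUnique n arr → Spec_isFrequencyUnique n arr (isFrequencyUnique n arr)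

-- ===== LEMMAS AND PROOFS =====

-- A's dict-building step is the Counter step once the branch is folded away
theorem stepA_eq_stepB (d : PySem.Dict Int Int) (i : Int) :
    (if d.contains i then d.insert i (d.getD i 0 + 1) else d.insert i 1)
      = d.insert i (d.getD i 0 + 1) := by
  by_cases h : d.contains i = true
  · simp [h]
  · simp only [Bool.not_eq_true] at h
    have := PySem.Dict.getD_of_not_contains (d := d) (k := i) (d0 := 0) h
    simp [h, this]

-- A's second loop succeeds iff the value list has no duplicates
theorem loopA_nodup (vals counts : List Int) (h : counts.Nodup) :
    loopA vals counts = true ↔ (counts ++ vals).Nodup := by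
  induction vals generalizing counts with
  | nil => simp [loopA, h]
  | cons v rest ih =>
    simp only [loopA]
    by_cases hc : v ∈ counts
    · simp only [List.contains_eq_mem, hc, decide_true, if_true]
      constructor
      · intro hh; cases hh
      · intro hn
        rw [List.nodup_append] at hn
        exact absurd rfl (hn.2.2 v hc v (by simp))
    · simp only [List.contains_eq_mem, hc, decide_false, Bool.false_eq_true, if_false]
      rw [ih (counts ++ [v])
        (by simp [List.nodup_append, h]; exact fun a ha hav => hc (hav ▸ ha))]
      rw [show counts ++ [v] ++ rest = counts ++ (v :: rest) by simp]

-- first-occurrence dedup of a cons: keep the head, drop its copies behind it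
theorem dedup_cons_filter (z : Int) (rest : List Int) :
    PySem.List.dedup (z :: rest)
      = z :: (PySem.List.dedup rest).filter (fun y => !(y == z)) := by
  simp only [PySem.List.dedup_eq_ofList, PySem.Set.ofList_cons]
  simp [PySem.Set.discard]

-- B's run-collecting scan over a ≤-sorted list x :: s, with pending run r of x's
theorem runs_spec (x : Int) (s : List Int) (F : List Int) (r : Int)
    (h : (x :: s).Pairwise (fun a b => a ≤ b)) :
    (((x :: s).zip s).foldl
        (fun (st : List Int × Int) p =>
          if p.1 == p.2 then (st.1, st.2 + 1) else (st.1 ++ [st.2], 1))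
        (F, r)).1
      ++ [(((x :: s).zip s).foldl
        (fun (st : List Int × Int) p =>
          if p.1 == p.2 then (st.1, st.2 + 1) else (st.1 ++ [st.2], 1))
        (F, r)).2]
      = F ++ (r + (s.count x : Int)) ::
          ((PySem.List.dedup s).filter (fun y => !(y == x))).map
            (fun k => ((s.count k : Nat) : Int)) := by
  induction s generalizing x F r with
  | nil => simp [PySem.List.dedup]
  | cons y t ih =>
    simp only [List.zip_cons_cons, List.foldl_cons]
    by_cases hxy : x = y
    · subst hxy
      rw [if_pos (by simp)]
      rw [ih x F (r + 1) h.tail]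
      rw [dedup_cons_filter x t]
      simp only [List.filter_cons, beq_self_eq_true, Bool.not_true, Bool.false_eq_true,
        if_false, List.filter_filter]
      rw [List.count_cons_self]
      have hmap : ((PySem.List.dedup t).filter (fun y => !(y == x) && !(y == x))).map
            (fun k => (((x :: t).count k : Nat) : Int))
          = ((PySem.List.dedup t).filter (fun y => !(y == x))).map
            (fun k => ((t.count k : Nat) : Int)) := by
        simp only [Bool.and_self]
        apply List.map_congr_left
        intro k hk
        have hkx : x ≠ k := by
          rcases List.mem_filter.mp hk with ⟨_, hkx⟩
          exact fun e => by simp [e] at hkx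
        simp [hkx]
      rw [hmap]
      congr 2
      push_cast
      ring
    · rw [if_neg (by simpa using hxy)]
      rw [ih y (F ++ [r]) 1 h.tail]
      have hxy' : x < y := lt_of_le_of_ne ((List.pairwise_cons.mp h).1 y (by simp)) hxy
      have hylet : ∀ k ∈ t, y ≤ k := (List.pairwise_cons.mp h.tail).1
      have hcx : (y :: t).count x = 0 := by
        rw [List.count_eq_zero]
        intro hmem
        rcases List.mem_cons.mp hmem with rfl | hm
        · exact absurd rfl (ne_of_gt hxy')
        · exact absurd (hylet x hm) (not_le.mpr hxy')
      rw [dedup_cons_filter y t]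
      have hfil : (y :: (PySem.List.dedup t).filter (fun w => !(w == y))).filter
            (fun w => !(w == x))
          = y :: (PySem.List.dedup t).filter (fun w => !(w == y)) := by
        apply List.filter_eq_self.mpr
        intro a ha
        rcases List.mem_cons.mp ha with rfl | ha'
        · simpa using (ne_of_gt hxy')
        · have hat : a ∈ t := by
            have := (List.mem_filter.mp ha').1
            simpa [PySem.List.mem_dedup] using this
          have : x < a := lt_of_lt_of_le hxy' (hylet a hat)
          simpa using (ne_of_gt this)
      rw [hfil]
      simp only [List.map_cons, List.count_cons_self]
      have hmap : ((PySem.List.dedup t).filter (fun w => !(w == y))).map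
            (fun k => (((y :: t).count k : Nat) : Int))
          = ((PySem.List.dedup t).filter (fun w => !(w == y))).map
            (fun k => ((t.count k : Nat) : Int)) := by
        apply List.map_congr_left
        intro k hk
        have hky : y ≠ k := by
          rcases List.mem_filter.mp hk with ⟨_, hky⟩
          exact fun e => by simp [e] at hky
        simp [hky]
      rw [hmap, hcx]
      have : ((t.count y + 1 : Nat) : Int) = 1 + (t.count y : Int) := by push_cast; ring
      rw [this]
      simp

-- dedup-then-count of a cons, no order assumptions needed
theorem dedup_map_count_cons (z : Int) (rest : List Int) :
    (PySem.List.dedup (z :: rest)).map (fun k => (((z :: rest).count k : Nat) : Int))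
      = (1 + (rest.count z : Int)) ::
          ((PySem.List.dedup rest).filter (fun y => !(y == z))).map
            (fun k => ((rest.count k : Nat) : Int)) := by
  rw [dedup_cons_filter z rest]
  simp only [List.map_cons, List.count_cons_self]
  have hmap : ((PySem.List.dedup rest).filter (fun y => !(y == z))).map
        (fun k => (((z :: rest).count k : Nat) : Int))
      = ((PySem.List.dedup rest).filter (fun y => !(y == z))).map
        (fun k => ((rest.count k : Nat) : Int)) := by
    apply List.map_congr_left
    intro k hk
    have hkz : z ≠ k := by
      rcases List.mem_filter.mp hk with ⟨_, hkz⟩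
      exact fun e => by simp [e] at hkz
    simp [hkz]
  rw [hmap]
  have : ((rest.count z + 1 : Nat) : Int) = 1 + (rest.count z : Int) := by push_cast; ring
  rw [this]

-- adjacent-distinct on a ≤-sorted list is exactly Nodup
theorem zip_tail_ne_iff_nodup (l : List Int) (h : l.Pairwise (· ≤ ·)) :
    ((l.zip l.tail).all (fun q => q.1 != q.2)) = true ↔ l.Nodup := by
  induction l with
  | nil => simp
  | cons a t ih =>
    cases t with
    | nil => simp
    | cons b t2 =>
      have hpt : (b :: t2).Pairwise (· ≤ ·) := h.tail
      have ih' := ih hpt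
      simp only [List.tail_cons] at ih'
      simp only [List.tail_cons, List.zip_cons_cons, List.all_cons, Bool.and_eq_true, ih']
      constructor
      · rintro ⟨hab, hnd⟩
        have hab' : a ≠ b := by simpa using hab
        refine List.nodup_cons.mpr ⟨?_, hnd⟩
        have hle : a ≤ b := (List.pairwise_cons.mp h).1 b (by simp)
        intro hmem
        rcases List.mem_cons.mp hmem with rfl | hm
        · exact hab' rfl
        · have hba : b ≤ a := (List.pairwise_cons.mp hpt).1 a hm
          exact hab' (le_antisymm hle hba)
      · intro hnd
        rcases List.nodup_cons.mp hnd with ⟨hna, hnd2⟩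
        refine ⟨?_, hnd2⟩
        simp only [bne_iff_ne, ne_eq]
        exact fun e => hna (e ▸ List.mem_cons_self ..)

-- A's dict values are the per-distinct-element counts, in first-occurrence order
theorem values_counter_eq (arr : List Int) :
    (PySem.Dict.counter arr).values
      = (PySem.Set.ofList arr).map (fun k => (arr.count k : Int)) := by
  have h := PySem.Dict.items_counter (xs := arr)
  calc (PySem.Dict.counter arr).values
      = (PySem.Dict.counter arr).items.map (·.2) := rfl
    _ = ((PySem.Set.ofList arr).map (fun k => (k, (arr.count k : Int)))).map (·.2) := by rw [h]
    _ = (PySem.Set.ofList arr).map (fun k => (arr.count k : Int)) := by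
        rw [List.map_map]; rfl

-- ===== VERDICT (by name: the statement is the Claim_ definition above) =====
theorem isFrequencyUnique_spec : Claim_equal_isFrequencyUnique := by
  intro n arr _
  show loopA (arr.foldl
      (fun d i => if d.contains i then d.insert i (d.getD i 0 + 1) else d.insert i 1)
      PySem.Dict.empty).values []
    = isFrequencyUnique_alt n arr
  have hfold : arr.foldl
      (fun d i => if d.contains i then d.insert i (d.getD i 0 + 1) else d.insert i 1)
      PySem.Dict.empty
      = PySem.Dict.counter arr := by
    rw [PySem.List.foldl_congr_mem arr
      (fun d i => if d.contains i then d.insert i (d.getD i 0 + 1) else d.insert i 1)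
      (fun (d : PySem.Dict Int Int) x => d.insert x (d.getD x 0 + 1))
      PySem.Dict.empty (fun d x _ => stepA_eq_stepB d x)]
    exact PySem.Dict.foldl_insert_getD_add_one_eq_counter arr
  rw [hfold, values_counter_eq]
  -- B side
  simp only [isFrequencyUnique_alt]
  rcases hs : PySem.List.sorted arr (fun v => v) false with _ | ⟨z, rest⟩
  · -- sorted arr = [] hence arr = []
    have harr : arr = [] := (PySem.List.sorted_eq_nil_iff arr (fun v => v) false).mp hs
    subst harr
    decide
  · have hsp : (z :: rest).Pairwise (fun a b => a ≤ b) := by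
      rw [← hs]
      exact PySem.List.sorted_pairwise arr (fun v => v)
    rw [PySem.List.slice_from_one]
    simp only [List.tail_cons, List.isEmpty_cons, Bool.false_eq_true, if_false]
    rw [runs_spec z rest [] 1 hsp]
    rw [List.nil_append, ← dedup_map_count_cons z rest]
    -- counts over sorted arr equal counts over arr
    have hcnt : ∀ k : Int, (z :: rest).count k = arr.count k := by
      intro k
      have hperm : (z :: rest).Perm arr := hs ▸ PySem.List.sorted_perm arr (fun v => v) false
      exact hperm.count_eq k
    have hmapc : (PySem.List.dedup (z :: rest)).map
          (fun k => (((z :: rest).count k : Nat) : Int))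
        = (PySem.List.dedup (z :: rest)).map (fun k => (arr.count k : Int)) := by
      apply List.map_congr_left
      intro k _
      rw [hcnt k]
    rw [hmapc]
    set vals := (PySem.List.dedup (z :: rest)).map (fun k => (arr.count k : Int)) with hvals
    set valsA := (PySem.Set.ofList arr).map (fun k => (arr.count k : Int)) with hvalsA
    have hpermv : vals.Perm valsA := by
      apply List.Perm.map
      rw [PySem.List.dedup_eq_ofList]
      apply (List.perm_ext_iff_of_nodup (PySem.Set.nodup_ofList _) (PySem.Set.nodup_ofList _)).mpr
      intro a
      rw [PySem.Set.mem_ofList, PySem.Set.mem_ofList]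
      constructor
      · intro ha
        have hperm : (z :: rest).Perm arr := hs ▸ PySem.List.sorted_perm arr (fun v => v) false
        exact hperm.mem_iff.mp ha
      · intro ha
        have hperm : (z :: rest).Perm arr := hs ▸ PySem.List.sorted_perm arr (fun v => v) false
        exact hperm.mem_iff.mpr ha
    rw [PySem.List.slice_from_one, Bool.eq_iff_iff,
      loopA_nodup valsA [] List.nodup_nil,
      zip_tail_ne_iff_nodup _ (PySem.List.sorted_pairwise vals (fun v => v))]
    simp only [List.nil_append]
    rw [(PySem.List.sorted_perm vals (fun v => v) false).nodup_iff]
    exact (hpermv.nodup_iff).symm
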